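-- pv_equiv track=rewrite | github.com/calvinpelletier/ai_old | util/inverse.py | _shift_coords
-- ===== SOURCE A (Python) =====
-- def _shift_coords(coords, dx, dy):
--     shifted_coords = []
--     for i, val in enumerate(coords):
--         if i % 2:
--             shifted = coords[i] + dy
--         else:
--             shifted = coords[i] + dx
--         shifted_coords.append(shifted)
--     return shifted_coords
-- ===== SOURCE B (Python) =====
-- def _shift_coords(coords, dx, dy):
--     result = [None] * len(coords)
--     result[0::2] = [v + dx for v in coords[0::2]]
--     result[1::2] = [v + dy for v in coords[1::2]]
--     return result
-- ===== Notes on version B (the rewrite author's own statement) =====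
-- stated objective: alternative
-- what changed: Replaces the single index-parity-branched loop with two separate strided slice passes (coords[0::2]+dx and coords[1::2]+dy) written back into a preallocated list, i.e. a branch-free decomposition into even and odd subsequences.
import Mathlib
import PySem

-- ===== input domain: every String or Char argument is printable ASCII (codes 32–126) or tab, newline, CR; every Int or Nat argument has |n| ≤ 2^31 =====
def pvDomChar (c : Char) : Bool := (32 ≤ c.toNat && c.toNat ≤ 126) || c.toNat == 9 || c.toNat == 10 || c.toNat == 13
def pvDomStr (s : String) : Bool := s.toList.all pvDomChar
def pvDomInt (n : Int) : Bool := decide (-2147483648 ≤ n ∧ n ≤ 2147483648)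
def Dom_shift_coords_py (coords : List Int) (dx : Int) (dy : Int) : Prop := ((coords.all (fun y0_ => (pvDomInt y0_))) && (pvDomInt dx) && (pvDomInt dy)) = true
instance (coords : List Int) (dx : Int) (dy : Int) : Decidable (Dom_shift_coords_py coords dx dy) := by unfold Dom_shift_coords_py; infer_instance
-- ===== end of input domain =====

-- B shifts the even-index and odd-index subsequences in two branch-free strided slice
-- passes instead of A's single parity-branched loop (alternative decomposition, same cost).


-- ===== PORT A =====
-- for i, val in enumerate(coords): if i % 2: shifted = coords[i]+dy else coords[i]+dx; append
-- (coords[i] is always in range here; pyGetD with default 0 is exact on those indices)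
def shift_coords_py (coords : List Int) (dx : Int) (dy : Int) : List Int :=
  (PySem.List.enumerate coords 0).foldl
    (fun shifted_coords iv =>
      let shifted :=
        if iv.1 % 2 ≠ 0 then PySem.List.pyGetD coords iv.1 0 + dy
        else PySem.List.pyGetD coords iv.1 0 + dx
      shifted_coords ++ [shifted])
    []

-- ===== PORT B =====
-- xs[0::2] for step 2 from a nonnegative start: every other element (exact hand port)
def pvEveryOther : List Int → List Int
  | [] => []
  | [x] => [x]
  | x :: _ :: r => x :: pvEveryOther r

-- result[0::2] = es; result[1::2] = os  into a preallocated list of the right length: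
-- interleave the two strided assignments back (exact when |es| - |os| ∈ {0,1}, which holds here)
def pvInterleave : List Int → List Int → List Int
  | [], ys => ys
  | x :: xs, ys => x :: pvInterleave ys xs
  termination_by xs ys => xs.length + ys.length
  decreasing_by simp; omega

def shift_coords_py_alt (coords : List Int) (dx : Int) (dy : Int) : List Int :=
  pvInterleave ((pvEveryOther coords).map (· + dx))
    ((pvEveryOther coords.tail).map (· + dy))

-- ===== PRECONDITION & SPEC =====
def Spec_shift_coords_py (coords : List Int) (dx : Int) (dy : Int) (out : List Int) : Prop := out = shift_coords_py_alt coords dx dy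
instance (coords : List Int) (dx : Int) (dy : Int) (out : List Int) : Decidable (Spec_shift_coords_py coords dx dy out) := by unfold Spec_shift_coords_py; infer_instance

-- ===== CLAIM (what is proved, stated in full; the proofs are below) =====
def Claim_equal_shift_coords_py : Prop := ∀ (coords : List Int) (dx : Int) (dy : Int), Dom_shift_coords_py coords dx dy → Spec_shift_coords_py coords dx dy (shift_coords_py coords dx dy)

-- ===== LEMMAS AND PROOFS =====

-- common reference: shift the head by the first offset, then recurse with the offsets swapped
def pvAltShift : List Int → Int → Int → List Int
  | [], _, _ => []
  | x :: r, dx, dy => (x + dx) :: pvAltShift r dy dx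

theorem pvEveryOther_cons (x : Int) (r : List Int) :
    pvEveryOther (x :: r) = x :: pvEveryOther r.tail := by
  cases r <;> rfl

theorem pvB_eq_alt (coords : List Int) (dx dy : Int) :
    shift_coords_py_alt coords dx dy = pvAltShift coords dx dy := by
  induction coords generalizing dx dy with
  | nil => simp [shift_coords_py_alt, pvEveryOther, pvInterleave, pvAltShift]
  | cons x r ih =>
    simp only [shift_coords_py_alt, pvEveryOther_cons, List.map_cons,
      List.tail_cons, pvAltShift, pvInterleave]
    have h := ih dy dx
    simp only [shift_coords_py_alt] at h
    rw [h]

theorem pvFoldl_push {α β : Type} (l : List α) (f : α → β) (init : List β) :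
    l.foldl (fun a x => a ++ [f x]) init = init ++ l.map f := by
  induction l generalizing init with
  | nil => simp
  | cons x xs ih => simp [List.foldl_cons, ih]

theorem pvA_eq_map (coords : List Int) (dx dy : Int) :
    shift_coords_py coords dx dy =
      (PySem.List.enumerate coords 0).map
        (fun iv => if iv.1 % 2 ≠ 0 then iv.2 + dy else iv.2 + dx) := by
  unfold shift_coords_py
  rw [pvFoldl_push (PySem.List.enumerate coords 0)
    (fun iv => if iv.1 % 2 ≠ 0 then PySem.List.pyGetD coords iv.1 0 + dy
               else PySem.List.pyGetD coords iv.1 0 + dx) []]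
  simp only [List.nil_append]
  refine List.map_congr_left ?_
  intro p hp
  rcases (PySem.List.mem_enumerate_iff coords 0 p).1 hp with ⟨k, hk, rfl⟩
  simp [PySem.List.pyGetD_natCast, hk]

theorem pvMapEnum (coords : List Int) (s : Int) (dx dy : Int) :
    (PySem.List.enumerate coords s).map
        (fun iv => if iv.1 % 2 ≠ 0 then iv.2 + dy else iv.2 + dx) =
      pvAltShift coords (if s % 2 = 0 then dx else dy) (if s % 2 = 0 then dy else dx) := by
  induction coords generalizing s with
  | nil => simp [PySem.List.enumerate, pvAltShift]
  | cons x r ih =>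
    rw [PySem.List.enumerate_cons, List.map_cons, ih (s + 1)]
    rcases Int.emod_two_eq s with h | h
    · have h1 : (s + 1) % 2 = 1 := by omega
      simp [h, h1, pvAltShift]
    · have h1 : (s + 1) % 2 = 0 := by omega
      simp [h, h1, pvAltShift]

theorem pvA_eq_alt (coords : List Int) (dx dy : Int) :
    shift_coords_py coords dx dy = pvAltShift coords dx dy := by
  rw [pvA_eq_map, pvMapEnum coords 0 dx dy]
  norm_num

-- ===== VERDICT (by name: the statement is the Claim_ definition above) =====
theorem shift_coords_py_spec : Claim_equal_shift_coords_py := by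
  intro coords dx dy _
  unfold Spec_shift_coords_py
  rw [pvA_eq_alt, pvB_eq_alt]
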